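-- pv_equiv track=rewrite | github.com/nabuel/Ejercicios-UTN | Caracteres/main.py | buscar_indice_letra
-- ===== SOURCE A (Python) =====
-- def buscar_indice_letra(palabra: str,
--                         letra: str)-> int:
--     '''
--     Busca el índice de la primer aparición de la letra.
--
--     Retorno: El índice de la letra. En caso de que no esté se devuelve -1
--     '''
--     for i in range(len(palabra)):
--         if ord(palabra[i]) == ord(letra):
--             return i
--         elif ord(palabra[i]) == ord(letra) + 32:
--             return i
--         elif ord(palabra[i]) == ord(letra) - 32:
--             return i
--
--     return -1
-- ===== SOURCE B (Python) =====
-- def buscar_indice_letra(palabra: str, letra: str) -> int: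
--     base = ord(letra)
--     hits = []
--     for code in (base, base + 32, base - 32):
--         if 0 <= code <= 0x10FFFF:
--             pos = palabra.find(chr(code))
--             if pos != -1:
--                 hits.append(pos)
--     return min(hits, default=-1)
-- ===== Notes on version B (the rewrite author's own statement) =====
-- stated objective: alternative
-- what changed: A does one index loop testing three codepoint equalities per character; B computes the three target codepoints (base, base+32, base-32), runs an independent str.find for each valid one, and returns the minimum of the hits (or -1), replacing the multi-condition scan by three first-occurrence scans combined by min.
-- outside the precondition, e.g. on buscar_indice_letra('', 'ab'): A returns -1, B raises TypeError
import Mathlib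
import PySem

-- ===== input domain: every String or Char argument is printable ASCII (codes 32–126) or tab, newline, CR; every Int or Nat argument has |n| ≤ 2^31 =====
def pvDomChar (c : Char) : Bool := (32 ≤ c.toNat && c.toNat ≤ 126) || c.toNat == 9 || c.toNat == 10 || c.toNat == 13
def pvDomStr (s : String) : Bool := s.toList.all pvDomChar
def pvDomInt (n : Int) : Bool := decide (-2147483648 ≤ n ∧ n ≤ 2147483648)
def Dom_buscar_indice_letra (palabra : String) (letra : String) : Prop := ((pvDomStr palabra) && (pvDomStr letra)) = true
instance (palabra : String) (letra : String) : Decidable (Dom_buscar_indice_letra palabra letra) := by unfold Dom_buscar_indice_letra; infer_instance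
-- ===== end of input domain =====

-- B replaces A's one multi-condition index loop by three independent first-occurrence
-- scans (str.find on each of base, base+32, base-32) combined by min — an alternative
-- decomposition of one pass and similar cost, with the return value proved equal.

-- ===== PORT A =====
-- 'for i in range(len(palabra)): if ord(palabra[i]) == base … elif … + 32 … elif … - 32 …'
-- as structural recursion over the characters, carrying the index i.
def pvGoA : List Char → Int → Nat → Int
  | [], _, _ => -1
  | c :: rest, base, i =>
      if (c.toNat : Int) = base then (i : Int)
      else if (c.toNat : Int) = base + 32 then (i : Int)
      else if (c.toNat : Int) = base - 32 then (i : Int)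
      else pvGoA rest base (i + 1)

-- ord(letra): under Pre_ letra has exactly one character, which headD returns.
def buscar_indice_letra (palabra : String) (letra : String) : Int :=
  pvGoA palabra.toList ((letra.toList.headD ' ').toNat : Int) 0

-- ===== PORT B =====
-- base = ord(letra); for code in (base, base+32, base-32): if chr-valid, pos = palabra.find(chr(code));
-- collect pos ≠ -1; return min(hits, default=-1).
def buscar_indice_letra_alt (palabra : String) (letra : String) : Int :=
  let base : Int := ((letra.toList.headD ' ').toNat : Int)
  let hits : List Int :=
    [base, base + 32, base - 32].foldl
      (fun hits code =>
        if 0 ≤ code ∧ code ≤ 1114111 then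
          let pos := PySem.Str.find palabra (String.ofList [Char.ofNat code.toNat])
          if pos ≠ -1 then hits ++ [pos] else hits
        else hits) []
  (PySem.List.min? hits (fun x => x)).getD (-1)

-- ===== PRECONDITION & SPEC =====
-- Pre_ excludes letra that is not a single character: there ord(letra) raises TypeError —
-- A raises it on every nonempty palabra, while on empty palabra A returns -1 only because
-- the loop body never runs; B evaluates ord(letra) up front and raises uniformly.
def Pre_buscar_indice_letra (palabra : String) (letra : String) : Prop :=
  letra.toList.length = 1

instance (palabra : String) (letra : String) : Decidable (Pre_buscar_indice_letra palabra letra) := by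
  unfold Pre_buscar_indice_letra; infer_instance

def pvWitness_buscar_indice_letra : String × String := ("Hola", "L")

def Spec_buscar_indice_letra (palabra : String) (letra : String) (out : Int) : Prop := out = buscar_indice_letra_alt palabra letra
instance (palabra : String) (letra : String) (out : Int) : Decidable (Spec_buscar_indice_letra palabra letra out) := by unfold Spec_buscar_indice_letra; infer_instance

-- ===== CLAIM (what is proved, stated in full; the proofs are below) =====
def Claim_equal_buscar_indice_letra : Prop := ∀ (palabra : String) (letra : String), Dom_buscar_indice_letra palabra letra → Pre_buscar_indice_letra palabra letra → Spec_buscar_indice_letra palabra letra (buscar_indice_letra palabra letra)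

-- ===== LEMMAS AND PROOFS =====

-- min over hits ignoring -1, and the index shift of a one-step cons
def pvMjoin (x y : Int) : Int := if x = -1 then y else if y = -1 then x else if x ≤ y then x else y
def pvShift (x : Int) : Int := if x = -1 then -1 else x + 1

theorem pv_goA_ge (s : List Char) (b : Int) (i : Nat) : -1 ≤ pvGoA s b i := by
  induction s generalizing i with
  | nil => simp [pvGoA]
  | cons c rest ih =>
      simp only [pvGoA]
      split_ifs <;> first | omega | exact ih (i + 1)

theorem pv_goA_shift (s : List Char) (b : Int) (i : Nat) :
    pvGoA s b i = if pvGoA s b 0 = -1 then -1 else pvGoA s b 0 + i := by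
  induction s generalizing i with
  | nil => simp [pvGoA]
  | cons c rest ih =>
      have hge := pv_goA_ge rest b 0
      by_cases h1 : (c.toNat : Int) = b
      · simp [pvGoA, h1]
      · by_cases h2 : (c.toNat : Int) = b + 32
        · simp [pvGoA, h1, h2]
        · by_cases h3 : (c.toNat : Int) = b - 32
          · simp [pvGoA, h1, h2, h3]
          · simp only [pvGoA, h1, h2, h3, if_false]
            rw [ih (i + 1), ih (0 + 1)]
            split_ifs <;> push_cast <;> omega

-- find s [t] = k when [t] is a prefix of s.drop k and of no earlier drop
theorem pv_find_eq (s sub : List Char) (k : Nat)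
    (hp : sub <+: s.drop k) (hmin : ∀ i, i < k → ¬ sub <+: s.drop i) :
    PySem.Chars.find s sub = (k : Int) := by
  obtain ⟨q, hq⟩ := hp
  have hinf : sub <:+: s := ⟨s.take k, q, by rw [List.append_assoc, hq, List.take_append_drop]⟩
  have h0 : 0 ≤ PySem.Chars.find s sub := (PySem.Chars.find_nonneg_iff s sub).mpr hinf
  obtain ⟨hpre, hm⟩ := PySem.Chars.find_spec h0
  rcases lt_trichotomy ((PySem.Chars.find s sub).toNat) k with h | h | h
  · exact absurd hpre (hmin _ h)
  · omega
  · exact absurd ⟨q, hq⟩ (hm _ h)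

theorem pv_find_singleton_cons (c t : Char) (rest : List Char) :
    PySem.Chars.find (c :: rest) [t] = if c = t then 0 else pvShift (PySem.Chars.find rest [t]) := by
  by_cases hct : c = t
  · subst hct
    rw [pv_find_eq (c :: rest) [c] 0 ⟨rest, rfl⟩ (by omega)]
    simp
  · simp only [hct, if_false, pvShift]
    by_cases hrest : PySem.Chars.find rest [t] = -1
    · have hmem : t ∉ rest := by
        intro hmem
        obtain ⟨p, q, hpq⟩ := List.append_of_mem hmem
        have : ([t] : List Char) <:+: rest := ⟨p, q, by simp [hpq]⟩
        exact absurd this ((PySem.Chars.find_eq_neg_one_iff rest [t]).mp hrest)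
      rw [hrest, if_pos rfl]
      apply (PySem.Chars.find_eq_neg_one_iff (c :: rest) [t]).mpr
      intro hinf
      have hmem2 : t ∈ c :: rest := List.singleton_sublist.mp hinf.sublist
      rcases List.mem_cons.mp hmem2 with h | h
      · exact hct h.symm
      · exact hmem h
    · have h0 : 0 ≤ PySem.Chars.find rest [t] := by
        have := PySem.Chars.neg_one_le_find (s := rest) (sub := [t])
        omega
      obtain ⟨hpre, hm⟩ := PySem.Chars.find_spec h0
      set k := (PySem.Chars.find rest [t]).toNat with hk
      rw [if_neg hrest, pv_find_eq (c :: rest) [t] (k + 1)]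
      · omega
      · simpa using hpre
      · intro i hi
        match i with
        | 0 =>
            intro hp
            obtain ⟨u, hu⟩ := hp
            simp at hu
            exact hct hu.1.symm
        | (j + 1) =>
            simp only [List.drop_succ_cons]
            exact hm j (by omega)

theorem pv_mjoin_ge (x y : Int) (hx : -1 ≤ x) (hy : -1 ≤ y) : -1 ≤ pvMjoin x y := by
  unfold pvMjoin; split_ifs <;> omega

theorem pv_mjoin_shift (x y : Int) (hx : -1 ≤ x) (hy : -1 ≤ y) :
    pvMjoin (pvShift x) (pvShift y) = pvShift (pvMjoin x y) := by
  unfold pvMjoin pvShift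
  split_ifs <;> omega

theorem pv_chr_eq (c : Char) (t : Int) (h0 : 0 ≤ t) (hv : t < 55296) :
    (c = Char.ofNat t.toNat) ↔ ((c.toNat : Int) = t) := by
  constructor
  · rintro rfl
    have hval : t.toNat.isValidChar := Or.inl (by omega)
    rw [Char.toNat_ofNat, if_pos hval]
    omega
  · intro h
    have : c.toNat = t.toNat := by omega
    calc c = Char.ofNat c.toNat := (Char.ofNat_toNat c).symm
      _ = Char.ofNat t.toNat := by rw [this]

theorem pv_shift_ge (x : Int) (hx : -1 ≤ x) : -1 ≤ pvShift x := by
  unfold pvShift; split_ifs <;> omega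

theorem pv_mjoin_zero_left (y : Int) (hy : -1 ≤ y) : pvMjoin 0 y = 0 := by
  unfold pvMjoin; split_ifs <;> first | omega | simp_all

theorem pv_mjoin_zero_right (x : Int) (hx : -1 ≤ x) : pvMjoin x 0 = 0 := by
  unfold pvMjoin; split_ifs <;> first | omega | simp_all

theorem pv_find_nil (t : Char) : PySem.Chars.find [] [t] = -1 := by
  apply (PySem.Chars.find_eq_neg_one_iff [] [t]).mpr
  intro h
  simpa using h.sublist

-- the central list-level equation: A's scan equals the min-combination of the three finds
theorem pv_main (s : List Char) (b : Int) (hb0 : 0 ≤ b) (hb : b ≤ 126) :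
    pvGoA s b 0 =
      pvMjoin (PySem.Chars.find s [Char.ofNat b.toNat])
        (pvMjoin (PySem.Chars.find s [Char.ofNat (b + 32).toNat])
          (if 32 ≤ b then PySem.Chars.find s [Char.ofNat (b - 32).toNat] else -1)) := by
  induction s with
  | nil =>
      simp only [pvGoA, pv_find_nil]
      unfold pvMjoin
      split_ifs <;> omega
  | cons c rest ih =>
      have hge1 := PySem.Chars.neg_one_le_find rest [Char.ofNat b.toNat]
      have hge2 := PySem.Chars.neg_one_le_find rest [Char.ofNat (b + 32).toNat]
      have hc1 := pv_chr_eq c b hb0 (by omega)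
      have hc2 := pv_chr_eq c (b + 32) (by omega) (by omega)
      have hgeIf : -1 ≤ (if 32 ≤ b then PySem.Chars.find rest [Char.ofNat (b - 32).toNat] else (-1 : Int)) := by
        split_ifs with h32
        · exact PySem.Chars.neg_one_le_find _ _
        · omega
      have hgeIfC : -1 ≤ (if 32 ≤ b then PySem.Chars.find (c :: rest) [Char.ofNat (b - 32).toNat] else (-1 : Int)) := by
        split_ifs with h32
        · exact PySem.Chars.neg_one_le_find _ _
        · omega
      rw [pv_find_singleton_cons, pv_find_singleton_cons]
      by_cases h1 : (c.toNat : Int) = b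
      · rw [if_pos (hc1.mpr h1), if_neg (fun h => by have := hc2.mp h; omega)]
        have hA : pvGoA (c :: rest) b 0 = 0 := by simp [pvGoA, h1]
        rw [hA, pv_mjoin_zero_left _ (pv_mjoin_ge _ _ (pv_shift_ge _ hge2) hgeIfC)]
      · rw [if_neg (fun h => h1 (hc1.mp h))]
        by_cases h2 : (c.toNat : Int) = b + 32
        · rw [if_pos (hc2.mpr h2)]
          have hA : pvGoA (c :: rest) b 0 = 0 := by simp [pvGoA, h1, h2]
          rw [hA, pv_mjoin_zero_left _ hgeIfC, pv_mjoin_zero_right _ (pv_shift_ge _ hge1)]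
        · rw [if_neg (fun h => h2 (hc2.mp h))]
          by_cases h3 : (c.toNat : Int) = b - 32
          · have h32 : 32 ≤ b := by
              have h0 : (0 : Int) ≤ (c.toNat : Int) := Int.natCast_nonneg _
              omega
            have hc3 := pv_chr_eq c (b - 32) (by omega) (by omega)
            have hA : pvGoA (c :: rest) b 0 = 0 := by simp [pvGoA, h1, h2, h3]
            rw [hA, if_pos h32, pv_find_singleton_cons, if_pos (hc3.mpr h3),
              pv_mjoin_zero_right _ (pv_shift_ge _ hge2),
              pv_mjoin_zero_right _ (pv_shift_ge _ hge1)]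
          · have hstep : pvGoA (c :: rest) b 0 = pvGoA rest b 1 := by
              simp [pvGoA, h1, h2, h3]
            have h3' : (if 32 ≤ b then PySem.Chars.find (c :: rest) [Char.ofNat (b - 32).toNat] else (-1 : Int)) =
                pvShift (if 32 ≤ b then PySem.Chars.find rest [Char.ofNat (b - 32).toNat] else (-1 : Int)) := by
              split_ifs with h32
              · have hc3 := pv_chr_eq c (b - 32) (by omega) (by omega)
                rw [pv_find_singleton_cons, if_neg (fun h => h3 (hc3.mp h))]
              · simp [pvShift]
            rw [hstep, h3', pv_mjoin_shift _ _ hge2 hgeIf,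
              pv_mjoin_shift _ _ hge1 (pv_mjoin_ge _ _ hge2 hgeIf),
              ← ih, pv_goA_shift rest b 1]
            unfold pvShift
            split_ifs <;> omega

theorem pv_min?_nil : PySem.List.min? ([] : List Int) (fun x => x) = none := by
  rw [PySem.List.min?_eq_none_iff]

theorem pv_alt_eq (palabra letra : String) (ch : Char) (hl : letra.toList = [ch]) (hb : ch.toNat ≤ 126) :
    buscar_indice_letra_alt palabra letra =
      pvMjoin (PySem.Chars.find palabra.toList [Char.ofNat ((ch.toNat : Int)).toNat])
        (pvMjoin (PySem.Chars.find palabra.toList [Char.ofNat (((ch.toNat : Int)) + 32).toNat])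
          (if 32 ≤ ((ch.toNat : Int)) then PySem.Chars.find palabra.toList [Char.ofNat (((ch.toNat : Int)) - 32).toNat] else -1)) := by
  unfold buscar_indice_letra_alt
  rw [hl]
  simp only [List.headD_cons, List.foldl]
  have hbr : ∀ x : Char, PySem.Str.find palabra (String.ofList [x]) = PySem.Chars.find palabra.toList [x] := fun x => by simp
  simp only [hbr]
  have hg1 := PySem.Chars.neg_one_le_find palabra.toList [Char.ofNat ((ch.toNat : Int)).toNat]
  have hg2 := PySem.Chars.neg_one_le_find palabra.toList [Char.ofNat (((ch.toNat : Int)) + 32).toNat]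
  have hg3 := PySem.Chars.neg_one_le_find palabra.toList [Char.ofNat (((ch.toNat : Int)) - 32).toNat]
  have c0 : (0:Int) ≤ (ch.toNat : Int) ∧ (ch.toNat : Int) ≤ 1114111 := ⟨by omega, by omega⟩
  have cp : (0:Int) ≤ (ch.toNat : Int) + 32 ∧ (ch.toNat : Int) + 32 ≤ 1114111 := ⟨by omega, by omega⟩
  simp only [if_pos c0, if_pos cp]
  by_cases h32 : 32 ≤ (ch.toNat : Int)
  · have cm : (0:Int) ≤ (ch.toNat : Int) - 32 ∧ (ch.toNat : Int) - 32 ≤ 1114111 := ⟨by omega, by omega⟩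
    rw [if_pos h32]
    simp only [if_pos cm, List.nil_append]
    unfold pvMjoin
    split_ifs <;>
      (try simp only [List.singleton_append, List.cons_append, List.nil_append, pv_min?_nil,
        PySem.List.min?_id_cons, List.foldl, Option.getD_some, Option.getD_none, min_def]) <;>
      omega
  · have cm : ¬((0:Int) ≤ (ch.toNat : Int) - 32 ∧ (ch.toNat : Int) - 32 ≤ 1114111) := by
      intro h
      exact absurd h.1 (by omega)
    rw [if_neg h32]
    simp only [if_neg cm, List.nil_append]
    unfold pvMjoin
    split_ifs <;>
      (try simp only [List.singleton_append, List.cons_append, List.nil_append, pv_min?_nil,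
        PySem.List.min?_id_cons, List.foldl, Option.getD_some, Option.getD_none, min_def]) <;>
      omega

theorem buscar_indice_letra_spec : Claim_equal_buscar_indice_letra := by
  intro palabra letra hdom hpre
  unfold Spec_buscar_indice_letra
  obtain ⟨ch, hl⟩ := List.length_eq_one_iff.mp hpre
  have hmem : ch ∈ letra.toList := by rw [hl]; simp
  have hdc : pvDomChar ch = true := by
    have : pvDomStr letra = true := by
      unfold Dom_buscar_indice_letra at hdom
      simp at hdom
      exact hdom.2
    exact List.all_eq_true.mp this ch hmem
  have hb : ch.toNat ≤ 126 := by
    simp [pvDomChar] at hdc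
    omega
  rw [pv_alt_eq palabra letra ch hl hb]
  unfold buscar_indice_letra
  rw [hl]
  simp only [List.headD_cons]
  exact pv_main palabra.toList (ch.toNat : Int) (by omega) (by omega)
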